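-- pv_equiv track=rewrite | github.com/HasibJadoon/QuranVocab | scripts/export_word_updates_chunks.py | chunked_iterator
-- ===== SOURCE A (Python) =====
-- from typing import Iterator, Tuple, Union
--
-- def chunked_iterator(iterator: Iterator[str], chunk_size: int) -> Iterator[Tuple[int, list]]:
--     chunk: list[str] = []
--     index = 1
--     for stmt in iterator:
--         chunk.append(stmt)
--         if len(chunk) >= chunk_size:
--             yield index, chunk
--             index += 1
--             chunk = []
--     if chunk:
--         yield index, chunk
-- ===== SOURCE B (Python) =====
-- from itertools import islice
--
-- def chunked_iterator(iterator, chunk_size):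
--     # pull-based: batch-extract each chunk with islice; non-positive sizes mean "one at a time"
--     size = chunk_size if chunk_size >= 1 else 1
--     it = iter(iterator)
--     index = 1
--     while True:
--         chunk = list(islice(it, size))
--         if not chunk:
--             return
--         yield index, chunk
--         index += 1
-- ===== Notes on version B (the rewrite author's own statement) =====
-- stated objective: idiomatic
-- what changed: Replaces per-item append-and-check accumulation with pull-based batch extraction via itertools.islice (whole chunks taken at once, no partial-chunk state), treating non-positive sizes as 1.
import Mathlib
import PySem

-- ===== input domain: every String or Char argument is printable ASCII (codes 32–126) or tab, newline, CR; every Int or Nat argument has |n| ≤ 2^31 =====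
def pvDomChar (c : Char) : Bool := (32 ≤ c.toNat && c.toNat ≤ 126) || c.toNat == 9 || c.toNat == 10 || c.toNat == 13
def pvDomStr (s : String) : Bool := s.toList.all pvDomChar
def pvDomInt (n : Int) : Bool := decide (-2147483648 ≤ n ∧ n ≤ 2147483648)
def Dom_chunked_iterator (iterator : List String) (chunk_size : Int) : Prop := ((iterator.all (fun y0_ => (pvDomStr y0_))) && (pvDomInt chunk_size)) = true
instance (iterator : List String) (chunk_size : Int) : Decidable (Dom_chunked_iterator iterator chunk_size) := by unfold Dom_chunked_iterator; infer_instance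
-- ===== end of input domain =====

-- B replaces A's per-item append-and-check accumulation with pull-based batch extraction
-- of whole chunks (itertools.islice), treating non-positive sizes as 1; objective: idiomatic.

-- ===== PORT A =====
-- A: fold over the items, growing a partial chunk, emitting it when len(chunk) >= chunk_size;
-- trailing non-empty chunk emitted at the end.
def chunked_iterator (iterator : List String) (chunk_size : Int) : List (Int × List String) :=
  let st := iterator.foldl
    (fun (s : List String × Int × List (Int × List String)) (stmt : String) =>
      let chunk := s.1 ++ [stmt]
      if chunk_size ≤ (chunk.length : Int) then
        (([] : List String), s.2.1 + 1, s.2.2 ++ [(s.2.1, chunk)])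
      else
        (chunk, s.2.1, s.2.2))
    ([], 1, [])
  if st.1 = [] then st.2.2 else st.2.2 ++ [(st.2.1, st.1)]

-- ===== PORT B =====
-- B's loop: repeatedly take a whole chunk of `m+1` items (islice) until the input is exhausted.
def pvChunkGo (m : Nat) : List String → Int → List (Int × List String)
  | [], _ => []
  | x :: rest, idx =>
      (idx, (x :: rest).take (m + 1)) :: pvChunkGo m ((x :: rest).drop (m + 1)) (idx + 1)
  termination_by l => l.length
  decreasing_by simp

def chunked_iterator_alt (iterator : List String) (chunk_size : Int) : List (Int × List String) :=
  let size : Nat := if 1 ≤ chunk_size then chunk_size.toNat else 1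
  pvChunkGo (size - 1) iterator 1

-- ===== PRECONDITION & SPEC =====
def Spec_chunked_iterator (iterator : List String) (chunk_size : Int) (out : List (Int × List String)) : Prop := out = chunked_iterator_alt iterator chunk_size
instance (iterator : List String) (chunk_size : Int) (out : List (Int × List String)) : Decidable (Spec_chunked_iterator iterator chunk_size out) := by unfold Spec_chunked_iterator; infer_instance

-- ===== CLAIM (what is proved, stated in full; the proofs are below) =====
def Claim_equal_chunked_iterator : Prop := ∀ (iterator : List String) (chunk_size : Int), Dom_chunked_iterator iterator chunk_size → Spec_chunked_iterator iterator chunk_size (chunked_iterator iterator chunk_size)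

-- ===== LEMMAS AND PROOFS =====

theorem pvChunkGo_nil (m : Nat) (idx : Int) : pvChunkGo m [] idx = [] := by
  rw [pvChunkGo]

theorem pvChunkGo_cons (m : Nat) (l : List String) (idx : Int) (h : l ≠ []) :
    pvChunkGo m l idx = (idx, l.take (m + 1)) :: pvChunkGo m (l.drop (m + 1)) (idx + 1) := by
  cases l with
  | nil => exact absurd rfl h
  | cons x rest => rw [pvChunkGo]

-- Loop invariant: running A's fold from partial chunk c (with c.length < s) and finalizing
-- equals acc ++ the B-style chunking of (c ++ rest), where s = max(chunk_size, 1).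
theorem pvKey (cs : Int) (s : Nat) (hcs : s = if 1 ≤ cs then cs.toNat else 1) (hs : 1 ≤ s) :
    ∀ (rest c : List String) (idx : Int) (acc : List (Int × List String)), c.length < s →
      (let st := rest.foldl
        (fun (t : List String × Int × List (Int × List String)) (stmt : String) =>
          let chunk := t.1 ++ [stmt]
          if cs ≤ (chunk.length : Int) then
            (([] : List String), t.2.1 + 1, t.2.2 ++ [(t.2.1, chunk)])
          else
            (chunk, t.2.1, t.2.2))
        (c, idx, acc)
       if st.1 = [] then st.2.2 else st.2.2 ++ [(st.2.1, st.1)])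
      = acc ++ pvChunkGo (s - 1) (c ++ rest) idx := by
  intro rest
  induction rest with
  | nil =>
    intro c idx acc hc
    simp only [List.foldl_nil, List.append_nil]
    cases c with
    | nil => simp [pvChunkGo_nil]
    | cons x t =>
      rw [pvChunkGo_cons _ _ _ (by simp)]
      have h1 : s - 1 + 1 = s := by omega
      rw [h1]
      rw [List.take_of_length_le (by omega), List.drop_eq_nil_of_le (by omega)]
      simp [pvChunkGo_nil]
  | cons x rest ih =>
    intro c idx acc hc
    simp only [List.foldl_cons]
    have hcond : (cs ≤ ((c ++ [x]).length : Int)) ↔ (s ≤ (c ++ [x]).length) := by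
      simp only [List.length_append, List.length_cons, List.length_nil]
      by_cases h : 1 ≤ cs
      · simp [h] at hcs; omega
      · simp [h] at hcs; omega
    by_cases hfull : cs ≤ ((c ++ [x]).length : Int)
    · have hlen : (c ++ [x]).length = s := by
        have := hcond.mp hfull
        simp only [List.length_append, List.length_cons, List.length_nil] at *
        omega
      simp only [hfull, if_pos]
      rw [ih [] (idx + 1) (acc ++ [(idx, c ++ [x])]) (by simpa using hs)]
      have hne : c ++ x :: rest ≠ [] := by simp
      rw [pvChunkGo_cons _ _ _ hne]
      have h1 : s - 1 + 1 = s := by omega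
      have hsplit : c ++ x :: rest = (c ++ [x]) ++ rest := by simp
      rw [h1, hsplit, ← hlen, List.take_left, List.drop_left]
      simp
    · simp only [hfull, if_neg, not_false_iff]
      have hlt : (c ++ [x]).length < s := by
        have := hcond
        rcases Nat.lt_or_ge (c ++ [x]).length s with h | h
        · exact h
        · exact absurd (hcond.mpr h) hfull
      rw [ih (c ++ [x]) idx acc hlt]
      simp

-- ===== VERDICT (by name: the statement is the Claim_ definition above) =====
theorem chunked_iterator_spec : Claim_equal_chunked_iterator := by
  intro iterator chunk_size _
  unfold Spec_chunked_iterator chunked_iterator chunked_iterator_alt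
  have hs : (1:Nat) ≤ (if 1 ≤ chunk_size then chunk_size.toNat else 1) := by
    split <;> omega
  have := pvKey chunk_size (if 1 ≤ chunk_size then chunk_size.toNat else 1) rfl hs
    iterator [] 1 [] (by simpa using hs)
  simpa using this
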